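-- pv_equiv track=rewrite | github.com/miloczek/Projekty-II-UWR | Mój Python/Zadanie python/lista 8/quiz.py | sprawdz
-- ===== SOURCE A (Python) =====
-- def sprawdz(s, n):
--     wykaz=literka(n)
--     for x in s:
--         if x not in wykaz:
--             return False
--         wykaz[x]-=1
--         if wykaz[x]<0:
--             return False
--     return True
--
-- def literka(s):
--     L=list(s)
--     D={}                            #funkcja z zadania 2
--     for i in range(len(L)):         #tworzę słownik z liter i ich ilości
--         if L[i] not in D:
--             D[(L[i])]= 1
--         else:
--             D[(L[i])]= D[(L[i])] + 1
--     return D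
-- ===== SOURCE B (Python) =====
-- def sprawdz(s, n):
--     cs = {}
--     for x in s:
--         cs[x] = cs.get(x, 0) + 1
--     cn = {}
--     for x in n:
--         cn[x] = cn.get(x, 0) + 1
--     return all(v <= cn.get(x, 0) for x, v in cs.items())
-- ===== Notes on version B (the rewrite author's own statement) =====
-- stated objective: simpler
-- what changed: B builds frequency tables for both strings and compares them as wholes (count_s[x] <= count_n[x] for each distinct x of s), instead of A's single decrementing pass over s with early returns against a mutable count dict of n.
import Mathlib
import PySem

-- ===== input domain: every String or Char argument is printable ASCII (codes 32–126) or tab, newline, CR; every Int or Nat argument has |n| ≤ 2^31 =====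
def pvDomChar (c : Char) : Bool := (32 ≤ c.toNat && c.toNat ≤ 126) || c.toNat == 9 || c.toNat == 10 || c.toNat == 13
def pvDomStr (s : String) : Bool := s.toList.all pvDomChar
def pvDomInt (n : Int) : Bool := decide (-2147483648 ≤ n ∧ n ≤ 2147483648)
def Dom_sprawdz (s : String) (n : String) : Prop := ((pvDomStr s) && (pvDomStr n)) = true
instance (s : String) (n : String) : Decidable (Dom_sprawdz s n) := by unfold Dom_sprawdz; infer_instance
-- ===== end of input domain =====

-- B replaces A's single decrementing pass over s (with early returns against a mutable
-- count dict of n) by building frequency tables for BOTH strings and comparing them as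
-- wholes; objective: simpler. Total on all inputs, so no Pre_.

-- ===== PORT A =====
-- helper 'literka': dict of letter counts, built by indexing over range(len(L))
def literka (t : String) : PySem.Dict Char Int :=
  (PySem.List.pyRange 0 (t.toList.length : Int) 1).foldl
    (fun D i =>
      -- c = L[i]; i is always in range here
      if D.contains (PySem.List.pyGetD t.toList i ' ') = false
      then D.insert (PySem.List.pyGetD t.toList i ' ') 1
      -- key present in this branch, so getD is the plain lookup
      else D.insert (PySem.List.pyGetD t.toList i ' ')
             (D.getD (PySem.List.pyGetD t.toList i ' ') 0 + 1))
    PySem.Dict.empty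

-- the for-loop of sprawdz with its early returns
def sprawdzLoop : List Char → PySem.Dict Char Int → Bool
  | [], _ => true
  | x :: rest, w =>
    if w.contains x = false then false     -- 'if x not in wykaz: return False'
    else
      let w' := w.insert x (w.getD x 0 - 1)  -- 'wykaz[x] -= 1'
      if w'.getD x 0 < 0 then false          -- 'if wykaz[x] < 0: return False'
      else sprawdzLoop rest w'

def sprawdz (s : String) (n : String) : Bool :=
  sprawdzLoop s.toList (literka n)

-- ===== PORT B =====
-- frequency table via d[x] = d.get(x, 0) + 1
def countsB (t : String) : PySem.Dict Char Int :=
  t.toList.foldl (fun d x => d.insert x (d.getD x 0 + 1)) PySem.Dict.empty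

def sprawdz_alt (s : String) (n : String) : Bool :=
  (countsB s).items.all (fun p => p.2 ≤ (countsB n).getD p.1 0)

-- ===== PRECONDITION & SPEC =====
def Spec_sprawdz (s : String) (n : String) (out : Bool) : Prop := out = sprawdz_alt s n
instance (s : String) (n : String) (out : Bool) : Decidable (Spec_sprawdz s n out) := by unfold Spec_sprawdz; infer_instance

-- ===== CLAIM (what is proved, stated in full; the proofs are below) =====
def Claim_equal_sprawdz : Prop := ∀ (s : String) (n : String), Dom_sprawdz s n → Spec_sprawdz s n (sprawdz s n)

-- ===== LEMMAS AND PROOFS =====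

-- literka builds exactly Counter(t)
theorem literka_eq_counter (t : String) :
    literka t = PySem.Dict.counter t.toList := by
  have h1 := PySem.List.foldl_pyRange_zero_pyGetD' t.toList ' '
    (fun (D : PySem.Dict Char Int) c =>
      if D.contains c = false then D.insert c 1
      else D.insert c (D.getD c 0 + 1)) PySem.Dict.empty
  unfold literka
  rw [h1, ← PySem.Dict.foldl_insert_getD_add_one_eq_counter]
  congr 1
  funext d c
  by_cases h : d.contains c = false
  · rw [if_pos h, PySem.Dict.getD_of_not_contains d 0 h]; norm_num
  · rw [if_neg h]

-- A's loop succeeds iff every character of xs occurs often enough in w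
theorem sprawdzLoop_iff (xs : List Char) (w : PySem.Dict Char Int) :
    sprawdzLoop xs w = true ↔ ∀ c ∈ xs, (xs.count c : Int) ≤ w.getD c 0 := by
  induction xs generalizing w with
  | nil => simp [sprawdzLoop]
  | cons x rest ih =>
    unfold sprawdzLoop
    by_cases hc : w.contains x = false
    · rw [if_pos hc]
      constructor
      · intro h; exact absurd h (by simp)
      · intro h
        have hx := h x (by simp)
        rw [PySem.Dict.getD_of_not_contains w 0 hc] at hx
        have h1 : 0 < (x :: rest).count x := List.count_pos_iff.mpr (by simp)
        have h2 : (0 : Int) < ((x :: rest).count x : Int) := by exact_mod_cast h1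
        omega
    · rw [if_neg hc]
      by_cases hneg : (w.insert x (w.getD x 0 - 1)).getD x 0 < 0
      · rw [if_pos hneg]
        rw [PySem.Dict.getD_insert] at hneg
        simp at hneg
        constructor
        · intro h; exact absurd h (by simp)
        · intro h
          have hx := h x (by simp)
          have h1 : 0 < (x :: rest).count x := List.count_pos_iff.mpr (by simp)
          have h2 : (1 : Int) ≤ ((x :: rest).count x : Int) := by exact_mod_cast h1
          omega
      · rw [if_neg hneg]
        rw [PySem.Dict.getD_insert] at hneg
        simp at hneg
        rw [ih]
        constructor
        · intro h c hmem
          by_cases hcx : c = x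
          · subst hcx
            have hcount : (c :: rest).count c = rest.count c + 1 := by simp
            by_cases hmr : c ∈ rest
            · have := h c hmr
              rw [PySem.Dict.getD_insert, if_pos rfl] at this
              rw [hcount]; push_cast; omega
            · have h0 : rest.count c = 0 := List.count_eq_zero.mpr hmr
              rw [hcount, h0]; push_cast; omega
          · have hmr : c ∈ rest := by
              rcases List.mem_cons.mp hmem with h' | h'
              · exact absurd h' hcx
              · exact h'
            have := h c hmr
            rw [PySem.Dict.getD_insert, if_neg hcx] at this
            have hcount : (x :: rest).count c = rest.count c :=
              List.count_cons_of_ne (Ne.symm hcx)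
            rw [hcount]
            exact this
        · intro h c hmem
          rw [PySem.Dict.getD_insert]
          by_cases hcx : c = x
          · subst hcx
            rw [if_pos rfl]
            have := h c (by simp)
            have hcount : (c :: rest).count c = rest.count c + 1 := by simp
            rw [hcount] at this; push_cast at this; omega
          · rw [if_neg hcx]
            have := h c (List.mem_cons_of_mem _ hmem)
            have hcount : (x :: rest).count c = rest.count c :=
              List.count_cons_of_ne (Ne.symm hcx)
            rw [hcount] at this
            exact this

-- B succeeds iff every character of s occurs in n at least as often
theorem sprawdz_alt_iff (s n : String) :
    sprawdz_alt s n = true ↔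
      ∀ c ∈ s.toList, (s.toList.count c : Int) ≤ (n.toList.count c : Int) := by
  unfold sprawdz_alt countsB
  rw [PySem.Dict.foldl_insert_getD_add_one_eq_counter,
      PySem.Dict.foldl_insert_getD_add_one_eq_counter,
      PySem.Dict.items_counter]
  simp [List.all_eq_true, PySem.Dict.getD_counter, PySem.Set.mem_ofList]

-- ===== VERDICT (by name: the statement is the Claim_ definition above) =====
theorem sprawdz_spec : Claim_equal_sprawdz := by
  intro s n _
  unfold Spec_sprawdz
  rw [Bool.eq_iff_iff]
  unfold sprawdz
  rw [literka_eq_counter, sprawdzLoop_iff, sprawdz_alt_iff]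
  constructor
  · intro h c hm
    have := h c hm
    rwa [PySem.Dict.getD_counter] at this
  · intro h c hm
    rw [PySem.Dict.getD_counter]
    exact h c hm
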